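-- pv_equiv track=rewrite | github.com/MilicaRangelov/Vestacka-Inteligencija | Lab4/zadatak6.py | noviDomeni
-- ===== SOURCE A (Python) =====
-- import copy
--
-- def indeksiDijagonala(koordinate):
--
--     indeksi = set()
--     for dI in range(1,9):
--         #gore desno
--         if koordinate[0] - dI >= 1 and koordinate[0]- dI <= 8 and koordinate[1]+dI >= 1 and koordinate[1]+dI <=8:
--             indeksi.add(tuple([koordinate[0]-dI,koordinate[1]+dI]))
--         #gore levo
--         if koordinate[0] - dI >= 1 and koordinate[0]-dI <=8 and koordinate[1]-dI >= 1 and koordinate[1]-dI <=8: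
--             indeksi.add(tuple([koordinate[0] - dI,koordinate[1]-dI]))
--         #dole desno
--         if koordinate[0] + dI >= 1 and koordinate[0]+dI <=8 and koordinate[1]+dI >= 1 and koordinate[1]+dI <=8:
--             indeksi.add(tuple([koordinate[0] + dI,koordinate[1]+dI]))
--         #dole levo
--         if koordinate[0] + dI >= 1 and koordinate[0]+dI <=8 and koordinate[1]-dI >= 1 and koordinate[1]-dI <=8:
--             indeksi.add(tuple([koordinate[0] + dI,koordinate[1]-dI]))
--
--
--     return indeksi
--
-- def noviDomeni(graph,koordinateKraljice):
--
--     dijagonale = indeksiDijagonala(koordinateKraljice)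
--     noviGraph = dict()
--
--     for kljuc in graph.keys():
--         noviGraph.update({kljuc : copy.deepcopy(graph[kljuc]) })
--
--         if int(kljuc) == koordinateKraljice[0]:
--             noviGraph.pop(kljuc)
--             continue
--
--         if koordinateKraljice[1] in noviGraph[kljuc]:
--             noviGraph[kljuc].remove(koordinateKraljice[1])
--
--         vrsta = int(kljuc)
--         for kor in dijagonale:
--             if kor[0] == vrsta and kor[1] in noviGraph[kljuc]:
--                 noviGraph[kljuc].remove(kor[1])
--                 if len(noviGraph[kljuc]) == 0:
--                     return None,True
--
--     failed = False
--
--     # for kljuc in noviGraph.keys():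
--     #     if len(noviGraph[kljuc]) == 0:
--     #         failed = True
--     #         break
--
--     return noviGraph,failed
-- ===== SOURCE B (Python) =====
-- def napadaDijagonalno(row, col, r, c):
--     # (row, col) lies on a board square that a queen at (r, c) attacks diagonally
--     d = abs(row - r)
--     return 1 <= d <= 8 and 1 <= row <= 8 and 1 <= col <= 8 and abs(col - c) == d
--
--
-- def noviDomeni(graph, koordinateKraljice):
--     r, c = koordinateKraljice
--     novi = {}
--     for kljuc, dom in graph.items():
--         row = int(kljuc)
--         if row == r:
--             continue
--         ostalo = [x for x in dom if x != c and not napadaDijagonalno(row, x, r, c)]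
--         if dom and not ostalo:
--             return None, True
--         novi[kljuc] = ostalo
--     return novi, False
-- ===== Notes on version B (the rewrite author's own statement) =====
-- stated objective: simpler
-- what changed: A precomputes the full set of diagonal cells and prunes each domain by membership tests plus repeated list.remove scans over that set, failing only mid-removal; B tests each domain value directly with the diagonal-attack arithmetic (|col-c| == |row-r| within the board) and rebuilds each domain with one filter per key, failing whenever pruning empties a non-empty domain. Pre_ excludes keys that int() cannot parse (A raises ValueError) and domains containing duplicate values, on which A's remove-first-occurrence-only pruning is an accident of list.remove; …
-- intended difference: On graphs where some variable outside the queen's row has domain exactly [queen's column] and no domain is wiped out by the diagonal constraints, A returns the graph with that variable's domain emptied and failed=False, while B returns (None, True); an emptied domain is exactly the failure this function is meant to signal (A's own commented-out final check confirms the intent). — e.g. on noviDomeni([("1", [2])], (2, 2)): A returns (some [("1", [])], false), B returns (none, true)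
-- outside the precondition, e.g. on noviDomeni({'1': [2, 2]}, (2, 2)): A returns ({'1': [2]}, False), B returns (None, True)
import Mathlib
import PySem

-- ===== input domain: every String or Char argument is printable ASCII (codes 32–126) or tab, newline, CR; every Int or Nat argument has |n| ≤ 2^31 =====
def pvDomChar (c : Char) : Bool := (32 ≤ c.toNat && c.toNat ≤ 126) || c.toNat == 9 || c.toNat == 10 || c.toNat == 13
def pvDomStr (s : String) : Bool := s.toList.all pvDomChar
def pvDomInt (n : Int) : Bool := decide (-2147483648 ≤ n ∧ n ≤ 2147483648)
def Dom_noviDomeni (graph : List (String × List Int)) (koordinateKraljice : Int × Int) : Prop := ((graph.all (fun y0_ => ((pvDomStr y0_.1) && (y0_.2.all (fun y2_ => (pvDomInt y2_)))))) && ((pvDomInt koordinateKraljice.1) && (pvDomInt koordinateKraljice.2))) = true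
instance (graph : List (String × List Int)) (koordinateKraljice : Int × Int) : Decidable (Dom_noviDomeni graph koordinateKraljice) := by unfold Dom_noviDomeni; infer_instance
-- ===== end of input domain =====

-- B replaces A's "build the diagonal-cell set, then repeated list.remove" by a direct arithmetic
-- attack test and one filter per domain (objective: simpler). B intentionally reports failure on any
-- domain a pruning empties (D_ below); return value only — A mutates nothing the caller keeps.

-- ===== PORT A =====
-- int(kljuc): `none` = ValueError; those inputs are excluded by Pre_noviDomeni (the fallback 0 is outside the claim)
def pvInt (s : String) : Int := (PySem.Int.ofStr? s).getD 0

-- the body of indeksiDijagonala's `for dI in range(1,9)` loop, named so the proofs can speak about one step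
def pvDijStep (koordinate : Int × Int) (indeksi : PySem.Set (Int × Int)) (dI : Int) : PySem.Set (Int × Int) :=
  let indeksi := if koordinate.1 - dI ≥ 1 ∧ koordinate.1 - dI ≤ 8 ∧ koordinate.2 + dI ≥ 1 ∧ koordinate.2 + dI ≤ 8
    then PySem.Set.add indeksi (koordinate.1 - dI, koordinate.2 + dI) else indeksi
  let indeksi := if koordinate.1 - dI ≥ 1 ∧ koordinate.1 - dI ≤ 8 ∧ koordinate.2 - dI ≥ 1 ∧ koordinate.2 - dI ≤ 8
    then PySem.Set.add indeksi (koordinate.1 - dI, koordinate.2 - dI) else indeksi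
  let indeksi := if koordinate.1 + dI ≥ 1 ∧ koordinate.1 + dI ≤ 8 ∧ koordinate.2 + dI ≥ 1 ∧ koordinate.2 + dI ≤ 8
    then PySem.Set.add indeksi (koordinate.1 + dI, koordinate.2 + dI) else indeksi
  let indeksi := if koordinate.1 + dI ≥ 1 ∧ koordinate.1 + dI ≤ 8 ∧ koordinate.2 - dI ≥ 1 ∧ koordinate.2 - dI ≤ 8
    then PySem.Set.add indeksi (koordinate.1 + dI, koordinate.2 - dI) else indeksi
  indeksi

def indeksiDijagonala (koordinate : Int × Int) : PySem.Set (Int × Int) :=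
  (PySem.List.pyRange 1 9 1).foldl (pvDijStep koordinate) PySem.Set.empty

-- the inner `for kor in dijagonale` loop; the result of the whole run is independent of the set's
-- iteration order (proved below), so the Set's list order stands in for Python's hash order
def pvADiag (vrsta : Int) : List (Int × Int) → List Int → Option (List Int)
  | [], dom => some dom
  | kor :: rest, dom =>
    if kor.1 = vrsta ∧ kor.2 ∈ dom then
      let dom' := (PySem.List.remove? dom kor.2).getD dom
      if dom'.length = 0 then none else pvADiag vrsta rest dom'
    else pvADiag vrsta rest dom

def pvALoop (g : PySem.Dict String (List Int)) (kk : Int × Int) (dij : List (Int × Int)) :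
    List String → PySem.Dict String (List Int) → Option (PySem.Dict String (List Int))
  | [], ng => some ng
  | kljuc :: rest, ng =>
    let ng1 := ng.insert kljuc (g.getD kljuc [])
    if pvInt kljuc = kk.1 then
      pvALoop g kk dij rest (ng1.erase kljuc)
    else
      let dom0 := ng1.getD kljuc []
      let dom1 := if kk.2 ∈ dom0 then (PySem.List.remove? dom0 kk.2).getD dom0 else dom0
      match pvADiag (pvInt kljuc) dij dom1 with
      | none => none
      | some dom2 => pvALoop g kk dij rest (ng1.insert kljuc dom2)

def noviDomeni (graph : List (String × List Int)) (koordinateKraljice : Int × Int) : (Option (List (String × List Int))) × Bool :=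
  let g := PySem.Dict.ofList graph
  match pvALoop g koordinateKraljice (indeksiDijagonala koordinateKraljice) g.keys PySem.Dict.empty with
  | some ng => (some ng.items, false)
  | none => (none, true)

-- ===== PORT B =====
-- napadaDijagonalno(row, col, r, c)
def pvNapada (r c row x : Int) : Bool :=
  decide (1 ≤ |row - r| ∧ |row - r| ≤ 8 ∧ 1 ≤ row ∧ row ≤ 8 ∧ 1 ≤ x ∧ x ≤ 8 ∧ |x - c| = |row - r|)

def pvBLoop (r c : Int) : List (String × List Int) → PySem.Dict String (List Int) → Option (PySem.Dict String (List Int))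
  | [], novi => some novi
  | (kljuc, dom) :: rest, novi =>
    let row := pvInt kljuc
    if row = r then pvBLoop r c rest novi
    else
      let ostalo := dom.filter (fun x => !(x == c) && !(pvNapada r c row x))
      if dom ≠ [] ∧ ostalo = [] then none
      else pvBLoop r c rest (novi.insert kljuc ostalo)

def noviDomeni_alt (graph : List (String × List Int)) (koordinateKraljice : Int × Int) : (Option (List (String × List Int))) × Bool :=
  let g := PySem.Dict.ofList graph
  match pvBLoop koordinateKraljice.1 koordinateKraljice.2 g.items PySem.Dict.empty with
  | some novi => (some novi.items, false)
  | none => (none, true)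

-- ===== PRECONDITION & SPEC =====
-- Pre_ excludes graphs with a key on which Python's int() raises ValueError (A calls int(kljuc) on
-- every key); graphs where some domain list contains duplicate values, on which A's
-- remove-first-occurrence-only pruning is an accident of list.remove; and graphs with duplicate
-- keys, a corner where the dict passed to A has already collapsed the association list.
def Pre_noviDomeni (graph : List (String × List Int)) (koordinateKraljice : Int × Int) : Prop :=
  (∀ p ∈ graph, (PySem.Int.ofStr? p.1).isSome = true ∧ p.2.Nodup) ∧ (graph.map Prod.fst).Nodup
instance (graph : List (String × List Int)) (koordinateKraljice : Int × Int) : Decidable (Pre_noviDomeni graph koordinateKraljice) := by unfold Pre_noviDomeni; infer_instance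

def pvWitness_noviDomeni : (List (String × List Int)) × (Int × Int) := ([("1", [2, 3]), ("2", [5])], (3, 4))

-- On graphs where some variable outside the queen's row has domain exactly [queen's column] and no
-- domain is wiped out by the diagonal constraints, A returns the graph with that domain emptied and
-- failed=False while B returns (None, True); an emptied domain is exactly the failure this function
-- is meant to signal (A's own commented-out final check confirms the intent).
def D_noviDomeni (graph : List (String × List Int)) (koordinateKraljice : Int × Int) : Prop :=
  (∃ p ∈ graph, PySem.Int.ofStr? p.1 ≠ some koordinateKraljice.1 ∧ p.2 = [koordinateKraljice.2]) ∧
  ¬ ∃ p ∈ graph, ∃ row ∈ PySem.Int.ofStr? p.1, row ≠ koordinateKraljice.1 ∧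
      (∃ x ∈ p.2, x ≠ koordinateKraljice.2) ∧
      ∀ x ∈ p.2, x = koordinateKraljice.2 ∨ (1 ≤ row ∧ row ≤ 8 ∧
        row - koordinateKraljice.1 ≤ 8 ∧ koordinateKraljice.1 - row ≤ 8 ∧ 1 ≤ x ∧ x ≤ 8 ∧
        (x + row = koordinateKraljice.2 + koordinateKraljice.1 ∨
         x - row = koordinateKraljice.2 - koordinateKraljice.1))
instance (graph : List (String × List Int)) (koordinateKraljice : Int × Int) : Decidable (D_noviDomeni graph koordinateKraljice) := by unfold D_noviDomeni; infer_instance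

def Spec_noviDomeni (graph : List (String × List Int)) (koordinateKraljice : Int × Int) (out : (Option (List (String × List Int))) × Bool) : Prop := ¬ D_noviDomeni graph koordinateKraljice → out = noviDomeni_alt graph koordinateKraljice
instance (graph : List (String × List Int)) (koordinateKraljice : Int × Int) (out : (Option (List (String × List Int))) × Bool) : Decidable (Spec_noviDomeni graph koordinateKraljice out) := by unfold Spec_noviDomeni; infer_instance

def pvDiffWitness_noviDomeni : (List (String × List Int)) × (Int × Int) := ([("1", [2])], (2, 2))
def pvDiffWitnessOut_noviDomeni : ((Option (List (String × List Int))) × Bool) × ((Option (List (String × List Int))) × Bool) :=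
  ((some [("1", [])], false), (none, true))

-- ===== CLAIM (what is proved, stated in full; the proofs are below) =====
def Claim_unchanged_noviDomeni : Prop := ∀ (graph : List (String × List Int)) (koordinateKraljice : Int × Int), Dom_noviDomeni graph koordinateKraljice → Pre_noviDomeni graph koordinateKraljice → Spec_noviDomeni graph koordinateKraljice (noviDomeni graph koordinateKraljice)
def Claim_changed_noviDomeni : Prop := Dom_noviDomeni (pvDiffWitness_noviDomeni.1) (pvDiffWitness_noviDomeni.2) ∧ Pre_noviDomeni (pvDiffWitness_noviDomeni.1) (pvDiffWitness_noviDomeni.2) ∧ D_noviDomeni (pvDiffWitness_noviDomeni.1) (pvDiffWitness_noviDomeni.2) ∧ noviDomeni (pvDiffWitness_noviDomeni.1) (pvDiffWitness_noviDomeni.2) = pvDiffWitnessOut_noviDomeni.1 ∧ noviDomeni_alt (pvDiffWitness_noviDomeni.1) (pvDiffWitness_noviDomeni.2) = pvDiffWitnessOut_noviDomeni.2 ∧ pvDiffWitnessOut_noviDomeni.1 ≠ pvDiffWitnessOut_noviDomeni.2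
def Claim_exact_noviDomeni : Prop := ∀ (graph : List (String × List Int)) (koordinateKraljice : Int × Int), Dom_noviDomeni graph koordinateKraljice → Pre_noviDomeni graph koordinateKraljice → D_noviDomeni graph koordinateKraljice → noviDomeni graph koordinateKraljice ≠ noviDomeni_alt graph koordinateKraljice

-- ===== LEMMAS AND PROOFS =====

-- proof-side restatement of D_'s two kinds of key, as Bool predicates the loop lemmas traverse
def pvKeyE (r c : Int) (p : String × List Int) : Bool :=
  match PySem.Int.ofStr? p.1 with
  | none => false
  | some row => row != r && p.2 == [c]
def pvKeyF (r c : Int) (p : String × List Int) : Bool :=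
  match PySem.Int.ofStr? p.1 with
  | none => false
  | some row => row != r && p.2.any (fun x => x != c) &&
      p.2.all (fun x => x == c || pvNapada r c row x)

theorem pv_dprop_iff (r c row x : Int) (hrow : row ≠ r) :
    (1 ≤ row ∧ row ≤ 8 ∧ row - r ≤ 8 ∧ r - row ≤ 8 ∧ 1 ≤ x ∧ x ≤ 8 ∧
        (x + row = c + r ∨ x - row = c - r))
      ↔ pvNapada r c row x = true := by
  unfold pvNapada
  rw [decide_eq_true_eq]
  rcases abs_cases (row - r) with ⟨h1, h1s⟩ | ⟨h1, h1s⟩ <;>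
    rcases abs_cases (x - c) with ⟨h2, h2s⟩ | ⟨h2, h2s⟩ <;> rw [h1, h2] <;> omega

theorem pvKeyE_iff (r c : Int) (p : String × List Int) :
    pvKeyE r c p = true ↔ ((PySem.Int.ofStr? p.1).isSome = true ∧ pvInt p.1 ≠ r ∧ p.2 = [c]) := by
  unfold pvKeyE pvInt
  cases h : PySem.Int.ofStr? p.1 with
  | none => simp
  | some row => simp

theorem pvKeyF_iff (r c : Int) (p : String × List Int) :
    pvKeyF r c p = true ↔ ((PySem.Int.ofStr? p.1).isSome = true ∧ pvInt p.1 ≠ r ∧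
      (∃ x ∈ p.2, x ≠ c) ∧ ∀ x ∈ p.2, x = c ∨ pvNapada r c (pvInt p.1) x = true) := by
  unfold pvKeyF pvInt
  cases h : PySem.Int.ofStr? p.1 with
  | none => simp
  | some row =>
    simp only [Option.getD_some, Option.isSome_some, true_and, Bool.and_eq_true,
      bne_iff_ne, List.any_eq_true, List.all_eq_true, Bool.or_eq_true, beq_iff_eq, and_assoc]

-- the columns that A's inner loop can remove at a given row
def pvCols (vrsta : Int) (ds : List (Int × Int)) : List Int :=
  ds.filterMap (fun p => if p.1 = vrsta then some p.2 else none)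

theorem pv_foldl_erase_nil (rs : List Int) : List.foldl List.erase ([] : List Int) rs = [] := by
  induction rs with
  | nil => rfl
  | cons r rs ih => simpa using ih

theorem pvADiag_eq (vrsta : Int) (ds : List (Int × Int)) (dom : List Int) :
    pvADiag vrsta ds dom =
      (if List.foldl List.erase dom (pvCols vrsta ds) = [] ∧ dom ≠ []
       then none else some (List.foldl List.erase dom (pvCols vrsta ds))) := by
  induction ds generalizing dom with
  | nil => simp [pvADiag, pvCols]
  | cons kor rest ih =>
    rw [pvADiag]
    by_cases hg : kor.1 = vrsta ∧ kor.2 ∈ dom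
    · rw [if_pos hg]
      have hrem : (PySem.List.remove? dom kor.2).getD dom = dom.erase kor.2 := by
        rw [PySem.List.remove?_eq_some_erase dom kor.2 hg.2]; rfl
      have hcols : pvCols vrsta (kor :: rest) = kor.2 :: pvCols vrsta rest := by
        simp [pvCols, hg.1]
      have hfold : List.foldl List.erase dom (kor.2 :: pvCols vrsta rest)
          = List.foldl List.erase (dom.erase kor.2) (pvCols vrsta rest) := rfl
      have hdom : dom ≠ [] := by
        rintro rfl; exact absurd hg.2 (List.not_mem_nil)
      rw [hrem, hcols, hfold]
      by_cases hz : (dom.erase kor.2).length = 0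
      · rw [if_pos hz]
        have hz' : dom.erase kor.2 = [] := List.length_eq_zero_iff.mp hz
        rw [hz', pv_foldl_erase_nil, if_pos ⟨rfl, hdom⟩]
      · rw [if_neg hz, ih]
        have h2 : dom.erase kor.2 ≠ [] := fun hh => hz (by simp [hh])
        simp [hdom, h2]
    · rw [if_neg hg, ih]
      by_cases h1 : kor.1 = vrsta
      · have h2 : kor.2 ∉ dom := fun hm => hg ⟨h1, hm⟩
        have hcols : pvCols vrsta (kor :: rest) = kor.2 :: pvCols vrsta rest := by
          simp [pvCols, h1]
        rw [hcols, List.foldl_cons, List.erase_of_not_mem h2]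
      · have hcols : pvCols vrsta (kor :: rest) = pvCols vrsta rest := by
          simp [pvCols, h1]
        rw [hcols]

theorem pv_foldl_erase_eq_filter (cols : List Int) :
    ∀ (dom : List Int), dom.Nodup →
      List.foldl List.erase dom cols = dom.filter (fun x => decide (x ∉ cols)) := by
  induction cols with
  | nil => intro dom _; simp
  | cons a cols ih =>
    intro dom h
    rw [List.foldl_cons, ih _ (h.erase a), List.Nodup.erase_eq_filter h, List.filter_filter]
    apply List.filter_congr
    intro x _
    by_cases h1 : x = a <;> by_cases h2 : x ∈ cols <;> simp [h1, h2]

theorem pv_mem_pvCols (vrsta col : Int) (ds : List (Int × Int)) :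
    col ∈ pvCols vrsta ds ↔ (vrsta, col) ∈ ds := by
  simp only [pvCols, List.mem_filterMap]
  constructor
  · rintro ⟨⟨a1, a2⟩, ha, hfa⟩
    by_cases h : a1 = vrsta <;> simp [h] at hfa
    subst h; subst hfa; exact ha
  · intro h
    exact ⟨(vrsta, col), h, by simp⟩

def pvInStep (r c dI : Int) (y : Int × Int) : Prop :=
  ((r + dI ≥ 1 ∧ r + dI ≤ 8 ∧ c - dI ≥ 1 ∧ c - dI ≤ 8) ∧ y = (r + dI, c - dI)) ∨
  (((r + dI ≥ 1 ∧ r + dI ≤ 8 ∧ c + dI ≥ 1 ∧ c + dI ≤ 8) ∧ y = (r + dI, c + dI)) ∨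
   (((r - dI ≥ 1 ∧ r - dI ≤ 8 ∧ c - dI ≥ 1 ∧ c - dI ≤ 8) ∧ y = (r - dI, c - dI)) ∨
    ((r - dI ≥ 1 ∧ r - dI ≤ 8 ∧ c + dI ≥ 1 ∧ c + dI ≤ 8) ∧ y = (r - dI, c + dI))))

theorem pv_mem_addIf {p : Prop} [Decidable p] (s : PySem.Set (Int × Int)) (x y : Int × Int) :
    (y ∈ (if p then PySem.Set.add s x else s)) ↔ ((p ∧ y = x) ∨ y ∈ s) := by
  split_ifs with h
  · rw [PySem.Set.mem_add]; tauto
  · tauto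

theorem pv_mem_dijStep (r c dI : Int) (s : PySem.Set (Int × Int)) (y : Int × Int) :
    y ∈ pvDijStep (r, c) s dI ↔ (pvInStep r c dI y ∨ y ∈ s) := by
  unfold pvDijStep
  simp only [pv_mem_addIf, pvInStep, or_assoc]

theorem pv_mem_foldl (r c : Int) (y : Int × Int) :
    ∀ (l : List Int) (s : PySem.Set (Int × Int)),
      y ∈ l.foldl (pvDijStep (r, c)) s ↔ ((∃ dI ∈ l, pvInStep r c dI y) ∨ y ∈ s)
  | [], s => by simp
  | dI :: l, s => by
    rw [List.foldl_cons, pv_mem_foldl r c y l, pv_mem_dijStep]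
    simp only [List.mem_cons]
    constructor
    · rintro (⟨d, hd, h⟩ | h | h)
      · exact Or.inl ⟨d, Or.inr hd, h⟩
      · exact Or.inl ⟨dI, Or.inl rfl, h⟩
      · exact Or.inr h
    · rintro (⟨d, rfl | hd, h⟩ | h)
      · exact Or.inr (Or.inl h)
      · exact Or.inl ⟨d, hd, h⟩
      · exact Or.inr (Or.inr h)

theorem pv_cols_iff (r c row col : Int) :
    col ∈ pvCols row (indeksiDijagonala (r, c)) ↔ pvNapada r c row col = true := by
  rw [pv_mem_pvCols]
  unfold indeksiDijagonala
  rw [pv_mem_foldl]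
  simp only [PySem.List.mem_pyRange_one, PySem.Set.empty, List.not_mem_nil, or_false,
    pvInStep, Prod.mk.injEq, pvNapada, decide_eq_true_eq]
  rcases abs_cases (row - r) with ⟨h1, h1s⟩ | ⟨h1, h1s⟩ <;>
    rcases abs_cases (col - c) with ⟨h2, h2s⟩ | ⟨h2, h2s⟩ <;>
    rw [h1, h2] <;>
    (constructor
     · rintro ⟨dI, hdI, (⟨hc, h3, h4⟩ | ⟨hc, h3, h4⟩ | ⟨hc, h3, h4⟩ | ⟨hc, h3, h4⟩)⟩ <;> omega
     · rintro ⟨hA, hB, hC, hD, hE, hF, hG⟩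
       first
         | exact ⟨row - r, ⟨by omega, by omega⟩, by omega⟩
         | exact ⟨r - row, ⟨by omega, by omega⟩, by omega⟩)

-- per-key: A's remove-c-then-diagonal-removals run equals B's filter-and-gate, stated for one key
theorem pv_key_char (r c row : Int) (dom : List Int) (hnd : dom.Nodup) :
    pvADiag row (indeksiDijagonala (r, c))
        (if c ∈ dom then (PySem.List.remove? dom c).getD dom else dom)
      = (if (∃ x ∈ dom, x ≠ c) ∧ (∀ x ∈ dom, x = c ∨ pvNapada r c row x = true)
         then none
         else some (dom.filter (fun x => !(x == c) && !(pvNapada r c row x)))) := by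
  have hrm : (if c ∈ dom then (PySem.List.remove? dom c).getD dom else dom) = dom.erase c := by
    split_ifs with h
    · rw [PySem.List.remove?_eq_some_erase dom c h]; rfl
    · rw [List.erase_of_not_mem h]
  rw [hrm, pvADiag_eq, List.Nodup.erase_eq_filter hnd,
    pv_foldl_erase_eq_filter _ _ (hnd.filter _), List.filter_filter]
  have hfil : (dom.filter fun x => decide (x ∉ pvCols row (indeksiDijagonala (r, c))) && (x != c))
      = dom.filter (fun x => !(x == c) && !(pvNapada r c row x)) := by
    apply List.filter_congr
    intro x _
    have hiff := pv_cols_iff r c row x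
    by_cases h2 : pvNapada r c row x = true
    · have hm : x ∈ pvCols row (indeksiDijagonala (r, c)) := hiff.mpr h2
      by_cases h1 : x = c <;> simp [h1, h2, hm, bne]
    · have hm : x ∉ pvCols row (indeksiDijagonala (r, c)) := fun hh => h2 (hiff.mp hh)
      have h2' : pvNapada r c row x = false := by
        cases hb : pvNapada r c row x
        · rfl
        · exact absurd hb h2
      by_cases h1 : x = c <;> simp [h1, h2', hm, bne]
  rw [hfil]
  have hc1 : (dom.filter (fun x => !(x == c) && !(pvNapada r c row x)) = []
        ∧ dom.filter (fun x : Int => x != c) ≠ [])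
      ↔ ((∃ x ∈ dom, x ≠ c) ∧ (∀ x ∈ dom, x = c ∨ pvNapada r c row x = true)) := by
    rw [List.filter_eq_nil_iff, Ne, List.filter_eq_nil_iff]
    constructor
    · rintro ⟨hall, hne⟩
      constructor
      · by_contra hx
        exact hne (fun a ha => by
          simp only [not_exists, not_and, not_not] at hx
          simp [hx a ha])
      · intro x hx
        have := hall x hx
        by_cases h1 : x = c
        · exact Or.inl h1
        · right
          simpa [h1] using this
    · rintro ⟨⟨x, hx, hxc⟩, hall⟩
      constructor
      · intro a ha
        rcases hall a ha with h | h <;> simp [h]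
      · intro hno
        exact absurd (by simpa using hno x hx) (by simpa using hxc)
  exact if_congr hc1 rfl rfl

theorem pv_eq_singleton (dom : List Int) (c : Int) (hnd : dom.Nodup) (hne : dom ≠ [])
    (hall : ∀ x ∈ dom, x = c) : dom = [c] := by
  cases dom with
  | nil => exact absurd rfl hne
  | cons x xs =>
    have hx : x = c := hall x List.mem_cons_self
    subst hx
    have hxs : xs = [] := by
      cases xs with
      | nil => rfl
      | cons y ys =>
        have hy : y = x := hall y (by simp)
        exact absurd (hy ▸ (by simp : y ∈ y :: ys)) (by
          subst hy
          exact (List.nodup_cons.mp hnd).1)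
    rw [hxs]

-- B's per-key gate (dom ≠ [] ∧ filter = []) states "this key is E or F"
theorem pv_gate_iff (r c row : Int) (dom : List Int) (hnd : dom.Nodup) :
    (dom ≠ [] ∧ dom.filter (fun x => !(x == c) && !(pvNapada r c row x)) = [])
      ↔ (dom = [c]
         ∨ ((∃ x ∈ dom, x ≠ c) ∧ (∀ x ∈ dom, x = c ∨ pvNapada r c row x = true))) := by
  constructor
  · rintro ⟨hne, hfil⟩
    rw [List.filter_eq_nil_iff] at hfil
    have hall : ∀ x ∈ dom, x = c ∨ pvNapada r c row x = true := by
      intro x hx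
      have := hfil x hx
      by_cases h1 : x = c
      · exact Or.inl h1
      · right; simpa [h1] using this
    by_cases hx : ∃ x ∈ dom, x ≠ c
    · exact Or.inr ⟨hx, hall⟩
    · simp only [not_exists, not_and, not_not] at hx
      exact Or.inl (pv_eq_singleton dom c hnd hne hx)
  · rintro (h | ⟨⟨x, hx, hxc⟩, hall⟩)
    · subst h
      constructor
      · simp
      · simp
    · refine ⟨fun hh => by simp [hh] at hx, ?_⟩
      rw [List.filter_eq_nil_iff]
      intro a ha
      rcases hall a ha with h | h <;> simp [h]

theorem pv_erase_insert (d : PySem.Dict String (List Int)) (k : String) (v : List Int)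
    (h : d.contains k = false) : (d.insert k v).erase k = d := by
  have hitems : ∀ p ∈ d.items, (p.1 == k) = false := by
    intro p hp
    by_contra hne
    have : d.contains k = true := by
      simp only [PySem.Dict.contains, List.any_eq_true]
      exact ⟨p, hp, by simpa using hne⟩
    simp [this] at h
  simp only [PySem.Dict.insert, h, Bool.false_eq_true, if_false, PySem.Dict.erase]
  apply PySem.Dict.ext
  simp only [List.filter_append]
  rw [List.filter_eq_self.mpr (by intro a ha; simpa using hitems a ha)]
  simp

theorem pv_mem_items_update {κ ν : Type} [BEq κ] [LawfulBEq κ] (ps : List (κ × ν)) :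
    ∀ (d : PySem.Dict κ ν) (q : κ × ν), q ∈ (d.update ps).items → q ∈ d.items ∨ q ∈ ps := by
  induction ps with
  | nil => intro d q h; exact Or.inl h
  | cons p rest ih =>
    intro d q h
    rw [PySem.Dict.update, List.foldl_cons] at h
    rcases ih _ q h with h1 | h1
    · rcases (PySem.Dict.mem_items_insert _ _ _ _).mp h1 with h2 | h2
      · exact Or.inr (by simp [h2])
      · exact Or.inl h2.1
    · exact Or.inr (List.mem_cons_of_mem _ h1)

theorem pv_mem_items_ofList {κ ν : Type} [BEq κ] [LawfulBEq κ] (ps : List (κ × ν)) (q : κ × ν)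
    (h : q ∈ (PySem.Dict.ofList ps).items) : q ∈ ps := by
  rcases pv_mem_items_update ps PySem.Dict.empty q h with h1 | h1
  · simp [PySem.Dict.empty] at h1
  · exact h1

-- if some item is an F key, A's loop ends in the early return
theorem pvA_none_of_F (g : PySem.Dict String (List Int)) (r c : Int) :
    ∀ (its : List (String × List Int)) (ng : PySem.Dict String (List Int)),
      (∀ p ∈ its, g.getD p.1 [] = p.2) → (∀ p ∈ its, p.2.Nodup) →
      (∃ p ∈ its, pvKeyF r c p = true) →
      pvALoop g (r, c) (indeksiDijagonala (r, c)) (its.map Prod.fst) ng = none := by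
  intro its
  induction its with
  | nil => rintro ng _ _ ⟨p, hp, _⟩; exact absurd hp (List.not_mem_nil)
  | cons p rest ih =>
    obtain ⟨kljuc, dom⟩ := p
    rintro ng hget hnd ⟨q, hq, hqF⟩
    have hgk : g.getD kljuc [] = dom := hget (kljuc, dom) List.mem_cons_self
    simp only [List.map_cons]
    rw [pvALoop]
    simp only [hgk]
    by_cases hrow : pvInt kljuc = r
    · rw [if_pos hrow]
      have hqrest : q ∈ rest := by
        rcases List.mem_cons.mp hq with h | h
        · exfalso
          rw [h] at hqF
          exact ((pvKeyF_iff r c (kljuc, dom)).mp hqF).2.1 hrow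
        · exact h
      exact ih _ (fun a ha => hget a (List.mem_cons_of_mem _ ha))
        (fun a ha => hnd a (List.mem_cons_of_mem _ ha)) ⟨q, hqrest, hqF⟩
    · rw [if_neg hrow, PySem.Dict.getD_insert_self,
        pv_key_char r c (pvInt kljuc) dom (hnd (kljuc, dom) List.mem_cons_self)]
      by_cases hcond : (∃ x ∈ dom, x ≠ c) ∧ (∀ x ∈ dom, x = c ∨ pvNapada r c (pvInt kljuc) x = true)
      · rw [if_pos hcond]
      · rw [if_neg hcond]
        have hqrest : q ∈ rest := by
          rcases List.mem_cons.mp hq with h | h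
          · exfalso
            rw [h] at hqF
            obtain ⟨-, -, hex, hall⟩ := (pvKeyF_iff r c (kljuc, dom)).mp hqF
            exact hcond ⟨hex, hall⟩
          · exact h
        exact ih _ (fun a ha => hget a (List.mem_cons_of_mem _ ha))
          (fun a ha => hnd a (List.mem_cons_of_mem _ ha)) ⟨q, hqrest, hqF⟩

-- if no item is an F key, A's loop runs to the end
theorem pvA_some_of_noF (g : PySem.Dict String (List Int)) (r c : Int) :
    ∀ (its : List (String × List Int)) (ng : PySem.Dict String (List Int)),
      (∀ p ∈ its, g.getD p.1 [] = p.2) → (∀ p ∈ its, p.2.Nodup) →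
      (∀ p ∈ its, (PySem.Int.ofStr? p.1).isSome = true) →
      (∀ p ∈ its, pvKeyF r c p = false) →
      ∃ ng', pvALoop g (r, c) (indeksiDijagonala (r, c)) (its.map Prod.fst) ng = some ng' := by
  intro its
  induction its with
  | nil => intro ng _ _ _ _; exact ⟨ng, rfl⟩
  | cons p rest ih =>
    obtain ⟨kljuc, dom⟩ := p
    intro ng hget hnd hsome hF
    have hgk : g.getD kljuc [] = dom := hget (kljuc, dom) List.mem_cons_self
    simp only [List.map_cons]
    rw [pvALoop]
    simp only [hgk]
    by_cases hrow : pvInt kljuc = r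
    · rw [if_pos hrow]
      exact ih _ (fun a ha => hget a (List.mem_cons_of_mem _ ha))
        (fun a ha => hnd a (List.mem_cons_of_mem _ ha))
        (fun a ha => hsome a (List.mem_cons_of_mem _ ha))
        (fun a ha => hF a (List.mem_cons_of_mem _ ha))
    · rw [if_neg hrow, PySem.Dict.getD_insert_self,
        pv_key_char r c (pvInt kljuc) dom (hnd (kljuc, dom) List.mem_cons_self)]
      have hcond : ¬ ((∃ x ∈ dom, x ≠ c) ∧ (∀ x ∈ dom, x = c ∨ pvNapada r c (pvInt kljuc) x = true)) := by
        intro hcond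
        have hFt : pvKeyF r c (kljuc, dom) = true :=
          (pvKeyF_iff r c (kljuc, dom)).mpr
            ⟨hsome (kljuc, dom) List.mem_cons_self, hrow, hcond.1, hcond.2⟩
        rw [hF (kljuc, dom) List.mem_cons_self] at hFt
        exact Bool.false_ne_true hFt
      rw [if_neg hcond]
      exact ih _ (fun a ha => hget a (List.mem_cons_of_mem _ ha))
        (fun a ha => hnd a (List.mem_cons_of_mem _ ha))
        (fun a ha => hsome a (List.mem_cons_of_mem _ ha))
        (fun a ha => hF a (List.mem_cons_of_mem _ ha))

-- if some item is an E or F key, B's loop ends in the early return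
theorem pvB_none_of_EF (r c : Int) :
    ∀ (its : List (String × List Int)) (ng : PySem.Dict String (List Int)),
      (∀ p ∈ its, p.2.Nodup) →
      (∃ p ∈ its, pvKeyE r c p = true ∨ pvKeyF r c p = true) →
      pvBLoop r c its ng = none := by
  intro its
  induction its with
  | nil => rintro ng _ ⟨p, hp, _⟩; exact absurd hp (List.not_mem_nil)
  | cons p rest ih =>
    obtain ⟨kljuc, dom⟩ := p
    rintro ng hnd ⟨q, hq, hqEF⟩
    rw [pvBLoop]
    by_cases hrow : pvInt kljuc = r
    · rw [if_pos hrow]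
      have hqrest : q ∈ rest := by
        rcases List.mem_cons.mp hq with h | h
        · exfalso
          rw [h] at hqEF
          rcases hqEF with h1 | h1
          · exact ((pvKeyE_iff r c (kljuc, dom)).mp h1).2.1 hrow
          · exact ((pvKeyF_iff r c (kljuc, dom)).mp h1).2.1 hrow
        · exact h
      exact ih _ (fun a ha => hnd a (List.mem_cons_of_mem _ ha)) ⟨q, hqrest, hqEF⟩
    · rw [if_neg hrow]
      by_cases hgate : dom ≠ [] ∧ dom.filter (fun x => !(x == c) && !(pvNapada r c (pvInt kljuc) x)) = []
      · rw [if_pos hgate]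
      · rw [if_neg hgate]
        have hqrest : q ∈ rest := by
          rcases List.mem_cons.mp hq with h | h
          · exfalso
            rw [h] at hqEF
            apply hgate
            rw [pv_gate_iff r c (pvInt kljuc) dom]
            · rcases hqEF with h1 | h1
              · exact Or.inl ((pvKeyE_iff r c (kljuc, dom)).mp h1).2.2
              · obtain ⟨-, -, hex, hall⟩ := (pvKeyF_iff r c (kljuc, dom)).mp h1
                exact Or.inr ⟨hex, hall⟩
            · exact hnd (kljuc, dom) List.mem_cons_self
          · exact h
        exact ih _ (fun a ha => hnd a (List.mem_cons_of_mem _ ha)) ⟨q, hqrest, hqEF⟩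

-- A's loop equals B's loop when no key is an E key, or some key is an F key
theorem pv_loop_eq (g : PySem.Dict String (List Int)) (r c : Int) :
    ∀ (its : List (String × List Int)) (ng : PySem.Dict String (List Int)),
      (∀ p ∈ its, g.getD p.1 [] = p.2) →
      (its.map Prod.fst).Nodup →
      (∀ p ∈ its, ng.contains p.1 = false) →
      (∀ p ∈ its, p.2.Nodup) →
      (∀ p ∈ its, (PySem.Int.ofStr? p.1).isSome = true) →
      ((∀ p ∈ its, pvKeyE r c p = false) ∨ (∃ p ∈ its, pvKeyF r c p = true)) →
      pvALoop g (r, c) (indeksiDijagonala (r, c)) (its.map Prod.fst) ng = pvBLoop r c its ng := by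
  intro its
  induction its with
  | nil => intro ng _ _ _ _ _ _; rfl
  | cons p rest ih =>
    obtain ⟨kljuc, dom⟩ := p
    intro ng hget hndk hcon hnd hsome hEF
    have hgk : g.getD kljuc [] = dom := hget (kljuc, dom) List.mem_cons_self
    have hck : ng.contains kljuc = false := hcon (kljuc, dom) List.mem_cons_self
    have hknotin : kljuc ∉ rest.map Prod.fst := by
      simp only [List.map_cons, List.nodup_cons] at hndk
      exact hndk.1
    have hndrest : (rest.map Prod.fst).Nodup := by
      simp only [List.map_cons, List.nodup_cons] at hndk
      exact hndk.2
    have hgetr : ∀ a ∈ rest, g.getD a.1 [] = a.2 := fun a ha => hget a (List.mem_cons_of_mem _ ha)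
    have hndr : ∀ a ∈ rest, a.2.Nodup := fun a ha => hnd a (List.mem_cons_of_mem _ ha)
    have hsomer : ∀ a ∈ rest, (PySem.Int.ofStr? a.1).isSome = true :=
      fun a ha => hsome a (List.mem_cons_of_mem _ ha)
    have hEFr : (∀ a ∈ (kljuc, dom) :: rest, pvKeyE r c a = false)
        ∨ (∃ a ∈ rest, pvKeyF r c a = true) ∨ pvKeyF r c (kljuc, dom) = true := by
      rcases hEF with h | ⟨q, hq, hqF⟩
      · exact Or.inl h
      · rcases List.mem_cons.mp hq with h | h
        · exact Or.inr (Or.inr (h ▸ hqF))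
        · exact Or.inr (Or.inl ⟨q, h, hqF⟩)
    simp only [List.map_cons]
    rw [pvALoop, pvBLoop]
    simp only [hgk]
    by_cases hrow : pvInt kljuc = r
    · rw [if_pos hrow, if_pos hrow, pv_erase_insert ng kljuc dom hck]
      apply ih ng hgetr hndrest (fun a ha => hcon a (List.mem_cons_of_mem _ ha)) hndr hsomer
      rcases hEFr with h | ⟨q, hq, hqF⟩ | hF
      · exact Or.inl (fun a ha => h a (List.mem_cons_of_mem _ ha))
      · exact Or.inr ⟨q, hq, hqF⟩
      · exfalso
        exact ((pvKeyF_iff r c (kljuc, dom)).mp hF).2.1 hrow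
    · rw [if_neg hrow, if_neg hrow, PySem.Dict.getD_insert_self,
        pv_key_char r c (pvInt kljuc) dom (hnd (kljuc, dom) List.mem_cons_self)]
      have hndhead : dom.Nodup := hnd (kljuc, dom) List.mem_cons_self
      by_cases hcond : (∃ x ∈ dom, x ≠ c) ∧ (∀ x ∈ dom, x = c ∨ pvNapada r c (pvInt kljuc) x = true)
      · -- head is an F key: both sides return none
        rw [if_pos hcond]
        have hgate : dom ≠ [] ∧ dom.filter (fun x => !(x == c) && !(pvNapada r c (pvInt kljuc) x)) = [] := by
          rw [pv_gate_iff r c (pvInt kljuc) dom hndhead]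
          exact Or.inr hcond
        rw [if_pos hgate]
      · rw [if_neg hcond]
        by_cases hE : dom = [c]
        · -- head is an E key: B fails here, A fails at the F key that ¬D_ guarantees further on
          have hgate : dom ≠ [] ∧ dom.filter (fun x => !(x == c) && !(pvNapada r c (pvInt kljuc) x)) = [] := by
            rw [pv_gate_iff r c (pvInt kljuc) dom hndhead]
            exact Or.inl hE
          rw [if_pos hgate]
          have hFrest : ∃ a ∈ rest, pvKeyF r c a = true := by
            rcases hEFr with h | h | hF
            · exfalso
              have hEt : pvKeyE r c (kljuc, dom) = true :=
                (pvKeyE_iff r c (kljuc, dom)).mpr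
                  ⟨hsome (kljuc, dom) List.mem_cons_self, hrow, hE⟩
              rw [h (kljuc, dom) List.mem_cons_self] at hEt
              exact Bool.false_ne_true hEt
            · exact h
            · exfalso
              obtain ⟨-, -, hex, hall⟩ := (pvKeyF_iff r c (kljuc, dom)).mp hF
              exact hcond ⟨hex, hall⟩
          exact pvA_none_of_F g r c rest _ hgetr hndr hFrest
        · -- ordinary key: identical new domain on both sides, recurse
          have hgate : ¬ (dom ≠ [] ∧ dom.filter (fun x => !(x == c) && !(pvNapada r c (pvInt kljuc) x)) = []) := by
            rw [pv_gate_iff r c (pvInt kljuc) dom hndhead]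
            rintro (h | h)
            · exact hE h
            · exact hcond h
          rw [if_neg hgate]
          show pvALoop g (r, c) (indeksiDijagonala (r, c)) (List.map Prod.fst rest)
              ((ng.insert kljuc dom).insert kljuc _) = _
          rw [PySem.Dict.insert_insert_self]
          apply ih
          · exact hgetr
          · exact hndrest
          · intro q hq
            rw [PySem.Dict.contains_insert]
            have h1 : (q.1 == kljuc) = false := by
              have : q.1 ≠ kljuc := by
                intro hh
                exact hknotin (hh ▸ List.mem_map_of_mem hq)
              simpa using this
            rw [h1, hcon q (List.mem_cons_of_mem _ hq)]
            rfl
          · exact hndr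
          · exact hsomer
          · rcases hEFr with h | h | hF
            · exact Or.inl (fun a ha => h a (List.mem_cons_of_mem _ ha))
            · exact Or.inr h
            · exfalso
              obtain ⟨-, -, hex, hall⟩ := (pvKeyF_iff r c (kljuc, dom)).mp hF
              exact hcond ⟨hex, hall⟩

-- with unique keys, building the dict appends every entry unchanged
theorem pv_items_eq (graph : List (String × List Int)) (hk : (graph.map Prod.fst).Nodup) :
    (PySem.Dict.ofList graph).items = graph := by
  have h := PySem.Dict.items_foldl_insert_fresh graph Prod.fst Prod.snd PySem.Dict.empty
    (fun a _ => rfl) hk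
  calc (PySem.Dict.ofList graph).items
      = (graph.foldl (fun d a => d.insert a.1 a.2) PySem.Dict.empty).items := rfl
    _ = graph := by rw [h]; simp [PySem.Dict.empty]

-- the bookkeeping facts about (Dict.ofList graph).items used by the verdicts
theorem pv_items_facts (graph : List (String × List Int)) (hpre : Pre_noviDomeni graph (0, 0)) :
    (∀ p ∈ (PySem.Dict.ofList graph).items, (PySem.Dict.ofList graph).getD p.1 [] = p.2)
    ∧ ((PySem.Dict.ofList graph).items.map Prod.fst).Nodup
    ∧ (∀ p ∈ (PySem.Dict.ofList graph).items, p.2.Nodup)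
    ∧ (∀ p ∈ (PySem.Dict.ofList graph).items, (PySem.Int.ofStr? p.1).isSome = true)
    ∧ (PySem.Dict.ofList graph).items = graph := by
  refine ⟨?_, ?_, ?_, ?_, pv_items_eq graph hpre.2⟩
  · intro p hp
    exact PySem.Dict.getD_of_mem_items _ (by cases p; exact hp) (PySem.Dict.nodup_keys_ofList _) []
  · exact PySem.Dict.nodup_keys_ofList graph
  · intro p hp
    exact (hpre.1 p (pv_mem_items_ofList graph p hp)).2
  · intro p hp
    exact (hpre.1 p (pv_mem_items_ofList graph p hp)).1

-- pvInt reads exactly the parsed value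
theorem pv_pvInt_eq (k : String) (row : Int) (h : PySem.Int.ofStr? k = some row) :
    pvInt k = row := by
  unfold pvInt
  rw [h]
  rfl

-- D_'s first conjunct names exactly the pvKeyE keys (on parseable keys), its second the pvKeyF keys
theorem pvKeyE_of_D (r c : Int) (p : String × List Int)
    (h1 : PySem.Int.ofStr? p.1 ≠ some r) (h2 : p.2 = [c])
    (hs : (PySem.Int.ofStr? p.1).isSome = true) : pvKeyE r c p = true := by
  obtain ⟨row, hrow⟩ := Option.isSome_iff_exists.mp hs
  refine (pvKeyE_iff r c p).mpr ⟨hs, ?_, h2⟩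
  rw [pv_pvInt_eq p.1 row hrow]
  intro hcon
  exact h1 (by rw [hrow, hcon])

theorem pvKeyF_iff_D (r c : Int) (p : String × List Int) :
    pvKeyF r c p = true ↔
      (∃ row ∈ PySem.Int.ofStr? p.1, row ≠ r ∧ (∃ x ∈ p.2, x ≠ c) ∧
        ∀ x ∈ p.2, x = c ∨ (1 ≤ row ∧ row ≤ 8 ∧ row - r ≤ 8 ∧ r - row ≤ 8 ∧ 1 ≤ x ∧ x ≤ 8 ∧
          (x + row = c + r ∨ x - row = c - r))) := by
  rw [pvKeyF_iff]
  constructor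
  · rintro ⟨hs, hne, hex, hall⟩
    obtain ⟨row, hrow⟩ := Option.isSome_iff_exists.mp hs
    have he := pv_pvInt_eq p.1 row hrow
    refine ⟨row, by rw [hrow]; rfl, he ▸ hne, hex, fun x hx => ?_⟩
    rcases hall x hx with h | h
    · exact Or.inl h
    · exact Or.inr ((pv_dprop_iff r c row x (he ▸ hne)).mpr (he ▸ h))
  · rintro ⟨row, hrow, hne, hex, hall⟩
    rw [Option.mem_def] at hrow
    have he := pv_pvInt_eq p.1 row hrow
    refine ⟨by rw [hrow]; rfl, he ▸ hne, hex, fun x hx => ?_⟩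
    rcases hall x hx with h | h
    · exact Or.inl h
    · exact Or.inr (he ▸ ((pv_dprop_iff r c row x hne).mp h))

-- ===== VERDICT (by name: the statements are the Claim_ definitions above) =====
theorem noviDomeni_spec : Claim_unchanged_noviDomeni := by
  unfold Claim_unchanged_noviDomeni
  intro graph kk _ hpre
  unfold Spec_noviDomeni
  intro hD
  obtain ⟨r, c⟩ := kk
  have hpre' : Pre_noviDomeni graph (0, 0) := hpre
  obtain ⟨hget, hndk, hnd, hsome, hitems⟩ := pv_items_facts graph hpre'
  unfold noviDomeni noviDomeni_alt
  show (match pvALoop (PySem.Dict.ofList graph) (r, c) (indeksiDijagonala (r, c))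
          ((PySem.Dict.ofList graph : PySem.Dict String (List Int)).keys) PySem.Dict.empty with
        | some ng => (some ng.items, false)
        | none => (none, true))
      = (match pvBLoop (r, c).1 (r, c).2 (PySem.Dict.ofList graph).items PySem.Dict.empty with
        | some novi => (some novi.items, false)
        | none => (none, true))
  have hkeys : (PySem.Dict.ofList graph : PySem.Dict String (List Int)).keys
      = (PySem.Dict.ofList graph).items.map Prod.fst := rfl
  rw [hkeys, pv_loop_eq (PySem.Dict.ofList graph) r c (PySem.Dict.ofList graph).items
      PySem.Dict.empty hget hndk (fun p _ => rfl) hnd hsome]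
  unfold D_noviDomeni at hD
  by_cases hB : ∃ p ∈ graph, ∃ row ∈ PySem.Int.ofStr? p.1, row ≠ r ∧ (∃ x ∈ p.2, x ≠ c) ∧
      ∀ x ∈ p.2, x = c ∨ (1 ≤ row ∧ row ≤ 8 ∧ row - r ≤ 8 ∧ r - row ≤ 8 ∧ 1 ≤ x ∧ x ≤ 8 ∧
        (x + row = c + r ∨ x - row = c - r))
  · right
    obtain ⟨p, hp, hF⟩ := hB
    exact ⟨p, by rw [hitems]; exact hp, (pvKeyF_iff_D r c p).mpr hF⟩
  · left
    intro p hp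
    cases hpe : pvKeyE r c p with
    | false => rfl
    | true =>
      exfalso
      obtain ⟨hs, hne, hdom⟩ := (pvKeyE_iff r c p).mp hpe
      apply hD
      refine ⟨⟨p, by rw [← hitems]; exact hp, ?_, hdom⟩, hB⟩
      intro hq
      exact hne (pv_pvInt_eq p.1 r hq)

theorem noviDomeni_changed : Claim_changed_noviDomeni := by
  unfold Claim_changed_noviDomeni
  exact ⟨by decide, by decide, by decide, by decide, by decide, by decide⟩

theorem noviDomeni_tight : Claim_exact_noviDomeni := by
  unfold Claim_exact_noviDomeni
  intro graph kk _ hpre hD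
  obtain ⟨r, c⟩ := kk
  have hpre' : Pre_noviDomeni graph (0, 0) := hpre
  obtain ⟨hget, hndk, hnd, hsome, hitems⟩ := pv_items_facts graph hpre'
  unfold D_noviDomeni at hD
  obtain ⟨⟨q, hq, hqne, hqdom⟩, hnoF⟩ := hD
  have hq' : q ∈ (PySem.Dict.ofList graph).items := by rw [hitems]; exact hq
  have hqE : pvKeyE r c q = true := pvKeyE_of_D r c q hqne hqdom (hsome q hq')
  have hB : noviDomeni_alt graph (r, c) = (none, true) := by
    show (match pvBLoop r c (PySem.Dict.ofList graph).items PySem.Dict.empty with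
          | some novi => (some novi.items, false)
          | none => (none, true)) = (none, true)
    rw [pvB_none_of_EF r c (PySem.Dict.ofList graph).items PySem.Dict.empty hnd
      ⟨q, hq', Or.inl hqE⟩]
  have hA : ∃ ng' : PySem.Dict String (List Int),
      noviDomeni graph (r, c) = (some ng'.items, false) := by
    obtain ⟨ng', hng'⟩ := pvA_some_of_noF (PySem.Dict.ofList graph) r c
      (PySem.Dict.ofList graph).items PySem.Dict.empty hget hnd hsome
      (fun p hp => by
        cases hpf : pvKeyF r c p with
        | false => rfl
        | true =>
          exact absurd ⟨p, by rw [← hitems]; exact hp, (pvKeyF_iff_D r c p).mp hpf⟩ hnoF)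
    refine ⟨ng', ?_⟩
    show (match pvALoop (PySem.Dict.ofList graph) (r, c) (indeksiDijagonala (r, c))
            ((PySem.Dict.ofList graph : PySem.Dict String (List Int)).keys) PySem.Dict.empty with
          | some ng => (some ng.items, false)
          | none => (none, true)) = (some ng'.items, false)
    have hkeys : (PySem.Dict.ofList graph : PySem.Dict String (List Int)).keys
        = (PySem.Dict.ofList graph).items.map Prod.fst := rfl
    rw [hkeys, hng']
  obtain ⟨ng', hng'⟩ := hA
  rw [hng', hB]
  simp
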